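-- pv_equiv track=rewrite | github.com/RobustNLP/TestTranslation | code/RTI/RTI.py | CheckInvariantDict
-- ===== SOURCE A (Python) =====
-- from collections import Counter
--
-- def CheckInvariantDict(np_super_target, np_sub_target, distance):
-- 	violation = False
-- 	currentdistance = 0
--
-- 	# count the number of every Chinese char
-- 	np_super_targetD = dict(Counter(np_super_target))
-- 	np_sub_targetD = dict(Counter(np_sub_target))
--
-- 	# count the number of every words
-- 	# np_super_targetD = dict(Counter(np_super_target.split()))
-- 	# np_sub_targetD = dict(Counter(np_sub_target.split()))
--
-- 	# additional "stop" chars in Chinese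
-- 	punctsL = ['“', '”', '，', '·', ' ', ',', '的', '了', "'", '"']
-- 	for pun in punctsL:
-- 		np_sub_targetD.pop(pun, None)
--
--
-- 	for key in np_sub_targetD:
-- 		if key not in np_super_targetD:
-- 			currentdistance += np_sub_targetD[key]
--
-- 		else:
-- 			value_difference = np_sub_targetD[key]-np_super_targetD[key]
-- 			if value_difference > 0:
-- 				currentdistance += value_difference
--
-- 	# if the distance is larger than a threshold, "True" will be returned to indicate a suspicious issue
-- 	if currentdistance>distance:
-- 		violation = True
--
-- 	return violation
-- ===== SOURCE B (Python) =====
-- def CheckInvariantDict(np_super_target, np_sub_target, distance):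
-- 	# Greedy online matching: walk the sub string one character at a time and try to
-- 	# consume a remaining copy of that character from the super string; every
-- 	# non-punctuation character that cannot be matched counts as one extra char.
-- 	puncts = {'“', '”', '，', '·', ' ', ',', '的', '了', "'", '"'}
-- 	avail = {}
-- 	for c in np_super_target:
-- 		avail[c] = avail.get(c, 0) + 1
-- 	extra = 0
-- 	for c in np_sub_target:
-- 		if c in puncts:
-- 			continue
-- 		n = avail.get(c, 0)
-- 		if n > 0:
-- 			avail[c] = n - 1
-- 		else:
-- 			extra += 1
-- 	return extra > distance
-- ===== Notes on version B (the rewrite author's own statement) =====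
-- stated objective: alternative
-- what changed: Instead of building a counter of the sub string and looping over its keys comparing counts, B never counts the sub string at all: it walks the sub string character by character, greedily consuming remaining copies from a mutable availability map of the super string, and tallies each unmatchable non-punctuation occurrence as one extra character (per-occurrence online matching vs per-key count comparison).
import Mathlib
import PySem

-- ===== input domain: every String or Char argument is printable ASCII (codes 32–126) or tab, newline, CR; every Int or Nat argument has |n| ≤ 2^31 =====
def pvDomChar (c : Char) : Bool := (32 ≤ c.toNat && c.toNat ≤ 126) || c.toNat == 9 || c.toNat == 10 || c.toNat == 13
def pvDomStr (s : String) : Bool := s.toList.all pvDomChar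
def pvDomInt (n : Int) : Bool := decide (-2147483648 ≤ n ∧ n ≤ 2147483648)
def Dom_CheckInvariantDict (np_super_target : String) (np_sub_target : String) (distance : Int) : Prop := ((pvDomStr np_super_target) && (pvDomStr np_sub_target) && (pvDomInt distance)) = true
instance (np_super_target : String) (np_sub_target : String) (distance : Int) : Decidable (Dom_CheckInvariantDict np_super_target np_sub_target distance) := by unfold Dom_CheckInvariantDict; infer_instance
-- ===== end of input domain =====

-- B replaces A's build-a-counter-of-sub-then-compare-counts-per-key algorithm by an online
-- per-occurrence greedy matching over the sub string against a mutable availability map of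
-- the super string (alternative decomposition; same asymptotic cost).

def pvPunctsL : List Char := ['“', '”', '，', '·', ' ', ',', '的', '了', '\'', '"']

-- ===== PORT A =====
def CheckInvariantDict (np_super_target : String) (np_sub_target : String) (distance : Int) : Bool :=
  let np_super_targetD := PySem.Dict.counter np_super_target.toList
  let np_sub_targetD0 := PySem.Dict.counter np_sub_target.toList
  -- for pun in punctsL: np_sub_targetD.pop(pun, None)
  let np_sub_targetD := pvPunctsL.foldl (fun d pun => d.erase pun) np_sub_targetD0
  let currentdistance : Int := np_sub_targetD.keys.foldl (fun acc key =>
      if np_super_targetD.contains key = false then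
        acc + np_sub_targetD.getD key 0
      else
        let value_difference := np_sub_targetD.getD key 0 - np_super_targetD.getD key 0
        if value_difference > 0 then acc + value_difference else acc) 0
  if currentdistance > distance then true else false

-- ===== PORT B =====
-- avail[c] = avail.get(c, 0) + 1 loop, then one pass over the sub string with state (avail, extra)
def CheckInvariantDict_alt (np_super_target : String) (np_sub_target : String) (distance : Int) : Bool :=
  let avail := np_super_target.toList.foldl
      (fun (d : PySem.Dict Char Int) c => d.insert c (d.getD c 0 + 1)) PySem.Dict.empty
  let st := np_sub_target.toList.foldl
      (fun (st : PySem.Dict Char Int × Int) c =>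
        if pvPunctsL.contains c then st
        else
          let n := st.1.getD c 0
          if n > 0 then (st.1.insert c (n - 1), st.2) else (st.1, st.2 + 1))
      (avail, (0 : Int))
  decide (st.2 > distance)

-- ===== PRECONDITION & SPEC =====
def Spec_CheckInvariantDict (np_super_target : String) (np_sub_target : String) (distance : Int) (out : Bool) : Prop := out = CheckInvariantDict_alt np_super_target np_sub_target distance
instance (np_super_target : String) (np_sub_target : String) (distance : Int) (out : Bool) : Decidable (Spec_CheckInvariantDict np_super_target np_sub_target distance out) := by unfold Spec_CheckInvariantDict; infer_instance

-- ===== CLAIM (what is proved, stated in full; the proofs are below) =====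
def Claim_equal_CheckInvariantDict : Prop := ∀ (np_super_target : String) (np_sub_target : String) (distance : Int), Dom_CheckInvariantDict np_super_target np_sub_target distance → Spec_CheckInvariantDict np_super_target np_sub_target distance (CheckInvariantDict np_super_target np_sub_target distance)

-- ===== LEMMAS AND PROOFS =====

theorem pv_foldl_erase_items {κ ν : Type} [BEq κ] (ps : List κ) (d : PySem.Dict κ ν) :
    (ps.foldl (fun d p => d.erase p) d).items
      = d.items.filter (fun q => !ps.contains q.1) := by
  induction ps generalizing d with
  | nil => simp
  | cons p ps ih =>
      rw [List.foldl_cons, ih]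
      show (PySem.Dict.erase d p).items.filter _ = _
      simp only [PySem.Dict.erase, List.filter_filter]
      congr 1
      funext q
      by_cases h : q.1 == p <;> simp [h]

-- the common value both programs compute: Σ over the distinct non-punctuation chars of xs
-- of the positive excess of their count in xs over their count available in d
def pvExcess (xs : List Char) (d : PySem.Dict Char Int) : Int :=
  ∑ k ∈ (xs.filter (fun c => !pvPunctsL.contains c)).toFinset,
    max 0 (((xs.filter (fun c => !pvPunctsL.contains c)).count k : Int) - d.getD k 0)

-- B's loop invariant: greedy matching computes pvExcess, for any nonnegative availability map
theorem pv_loop_excess (xs : List Char) (d : PySem.Dict Char Int) (e : Int)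
    (hd : ∀ k, 0 ≤ d.getD k 0) :
    (xs.foldl
      (fun (st : PySem.Dict Char Int × Int) c =>
        if pvPunctsL.contains c then st
        else
          let n := st.1.getD c 0
          if n > 0 then (st.1.insert c (n - 1), st.2) else (st.1, st.2 + 1))
      (d, e)).2 = e + pvExcess xs d := by
  induction xs generalizing d e with
  | nil => simp [pvExcess]
  | cons c xs ih =>
      by_cases hp : pvPunctsL.contains c
      · have hp' : c ∈ pvPunctsL := by simpa using hp
        rw [List.foldl_cons, if_pos hp, ih d e hd]
        simp [pvExcess, hp']
      · have hp' : c ∉ pvPunctsL := by simpa using hp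
        rw [List.foldl_cons, if_neg hp]
        simp only
        have hfc : (c :: xs).filter (fun c => !pvPunctsL.contains c)
            = c :: xs.filter (fun c => !pvPunctsL.contains c) := by
          simp [hp']
        set L := xs.filter (fun c => !pvPunctsL.contains c) with hL
        by_cases hpos : d.getD c 0 > 0
        · rw [if_pos hpos]
          have hd' : ∀ k, 0 ≤ (d.insert c (d.getD c 0 - 1)).getD k 0 := by
            intro k
            rw [PySem.Dict.getD_insert]
            split
            · omega
            · exact hd k
          rw [ih _ e hd']
          congr 1
          unfold pvExcess
          rw [hfc, ← hL, List.toFinset_cons]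
          by_cases hc : c ∈ L.toFinset
          · rw [Finset.insert_eq_self.mpr hc]
            apply Finset.sum_congr rfl
            intro k hk
            rw [List.count_cons, PySem.Dict.getD_insert]
            by_cases hkc : k = c
            · subst hkc; simp; omega
            · have hck : (c == k) = false := by
                simp only [beq_eq_false_iff_ne, ne_eq]
                exact fun h => hkc h.symm
              simp [hck, hkc]
          · rw [Finset.sum_insert hc]
            have hcnt : L.count c = 0 :=
              List.count_eq_zero.mpr (fun h => hc (List.mem_toFinset.mpr h))
            have hterm : max 0 (((c :: L).count c : Int) - d.getD c 0) = 0 := by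
              rw [List.count_cons_self, hcnt]
              omega
            rw [hterm, zero_add]
            apply Finset.sum_congr rfl
            intro k hk
            have hkc : k ≠ c := fun h => hc (h ▸ hk)
            rw [List.count_cons, PySem.Dict.getD_insert]
            have hck : (c == k) = false := by
              simp only [beq_eq_false_iff_ne, ne_eq]
              exact fun h => hkc h.symm
            simp [hck, hkc]
        · rw [if_neg hpos]
          have hdc : d.getD c 0 = 0 := le_antisymm (by omega) (hd c)
          rw [ih d (e + 1) hd]
          unfold pvExcess
          rw [hfc, ← hL, List.toFinset_cons]
          by_cases hc : c ∈ L.toFinset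
          · rw [Finset.insert_eq_self.mpr hc]
            have hsplit : ∀ k ∈ L.toFinset,
                max 0 (((c :: L).count k : Int) - d.getD k 0)
                  = max 0 ((L.count k : Int) - d.getD k 0) + (if k = c then 1 else 0) := by
              intro k hk
              rw [List.count_cons]
              by_cases hkc : k = c
              · subst hkc
                rw [hdc]
                simp
                omega
              · have hck : (c == k) = false := by
                  simp only [beq_eq_false_iff_ne, ne_eq]
                  exact fun h => hkc h.symm
                simp [hck, hkc]
            rw [Finset.sum_congr rfl hsplit, Finset.sum_add_distrib,
                Finset.sum_ite_eq' L.toFinset c (fun _ => (1 : Int)), if_pos hc]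
            ring
          · rw [Finset.sum_insert hc]
            have hcnt : L.count c = 0 :=
              List.count_eq_zero.mpr (fun h => hc (List.mem_toFinset.mpr h))
            have hterm : max 0 (((c :: L).count c : Int) - d.getD c 0) = 1 := by
              rw [List.count_cons_self, hcnt, hdc]
              omega
            rw [hterm]
            have : ∑ k ∈ L.toFinset, max 0 (((c :: L).count k : Int) - d.getD k 0)
                = ∑ k ∈ L.toFinset, max 0 ((L.count k : Int) - d.getD k 0) := by
              apply Finset.sum_congr rfl
              intro k hk
              have hkc : k ≠ c := fun h => hc (h ▸ hk)
              rw [List.count_cons]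
              have hck : (c == k) = false := by
                simp only [beq_eq_false_iff_ne, ne_eq]
                exact fun h => hkc h.symm
              simp [hck]
            rw [this]
            ring

set_option maxHeartbeats 4000000 in
theorem CheckInvariantDict_eq_alt (np_super_target np_sub_target : String) (distance : Int) :
    CheckInvariantDict np_super_target np_sub_target distance
      = CheckInvariantDict_alt np_super_target np_sub_target distance := by
  unfold CheckInvariantDict CheckInvariantDict_alt
  dsimp only
  set supL := np_super_target.toList with hsupL
  set subL := np_sub_target.toList with hsubL
  set sup := PySem.Dict.counter supL with hsup
  -- B's availability map is exactly Counter(super)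
  have havail : supL.foldl (fun (d : PySem.Dict Char Int) c => d.insert c (d.getD c 0 + 1))
      PySem.Dict.empty = sup := PySem.Dict.foldl_insert_getD_add_one_eq_counter supL
  have hsupnn : ∀ k, 0 ≤ sup.getD k 0 := by
    intro k
    rw [hsup, PySem.Dict.getD_counter]
    exact Int.natCast_nonneg _
  -- B side: the loop computes pvExcess subL sup
  rw [havail, pv_loop_excess subL sup 0 hsupnn, zero_add]
  -- A side: rewrite the accumulation as a sum over the erased dict's items
  set csub := PySem.Dict.counter subL with hcsub
  set subD := pvPunctsL.foldl (fun d pun => d.erase pun) csub with hsubD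
  have hA : subD.items = csub.items.filter (fun q => !pvPunctsL.contains q.1) :=
    pv_foldl_erase_items _ _
  have hsubnodup : subD.keys.Nodup := by
    show (subD.items.map Prod.fst).Nodup
    rw [hA]
    exact (PySem.Dict.nodup_keys_counter subL).sublist (List.filter_sublist.map _)
  have hsubval : ∀ p ∈ subD.items, subD.getD p.1 0 = p.2 := by
    rintro ⟨k, v⟩ hp
    exact PySem.Dict.getD_of_mem_items _ hp hsubnodup 0
  have hstep : (fun (acc : Int) key =>
      if sup.contains key = false then acc + subD.getD key 0
      else
        let value_difference := subD.getD key 0 - sup.getD key 0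
        if value_difference > 0 then acc + value_difference else acc)
      = fun acc key => acc +
          (if sup.contains key = false then subD.getD key 0
           else if subD.getD key 0 - sup.getD key 0 > 0 then subD.getD key 0 - sup.getD key 0 else 0) := by
    funext acc key
    dsimp only
    split_ifs <;> omega
  rw [hstep, PySem.List.foldl_add, zero_add]
  have hkeys : subD.keys = subD.items.map Prod.fst := rfl
  rw [hkeys, List.map_map, hA, hcsub, PySem.Dict.items_counter]
  -- turn the A-side sum into a map over the distinct non-punct chars of subL
  rw [List.filter_map, List.map_map]
  simp only [Function.comp_def]
  set K := (PySem.Set.ofList subL).filter (fun k => !pvPunctsL.contains k) with hK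
  have hKnodup : K.Nodup := (PySem.Set.nodup_ofList subL).filter _
  have hcongr : ∀ k ∈ K,
      (fun key =>
          if sup.contains key = false then subD.getD key 0
          else if subD.getD key 0 - sup.getD key 0 > 0 then subD.getD key 0 - sup.getD key 0 else 0) k
      = max 0 ((subL.count k : Int) - sup.getD k 0) := by
    intro k hk
    have hkmem : k ∈ PySem.Set.ofList subL := List.mem_of_mem_filter hk
    have hkitem : (k, (subL.count k : Int)) ∈ subD.items := by
      rw [hA, hcsub, PySem.Dict.items_counter, List.filter_map]
      refine List.mem_map_of_mem ?_
      simpa [hK, Function.comp] using hk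
    have hval : subD.getD k 0 = (subL.count k : Int) := hsubval _ hkitem
    have hcount : 0 < subL.count k := by
      have : k ∈ subL := (PySem.Set.mem_ofList _ _).mp hkmem
      exact List.count_pos_iff.mpr this
    simp only [hval]
    by_cases hc : sup.contains k = false
    · rw [if_pos hc, PySem.Dict.getD_of_not_contains _ 0 hc]
      omega
    · rw [if_neg hc]
      split_ifs <;> omega
  rw [List.map_congr_left hcongr]
  -- and relate it to pvExcess subL sup
  have hsum : (K.map (fun k => max 0 ((subL.count k : Int) - sup.getD k 0))).sum
      = pvExcess subL sup := by
    unfold pvExcess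
    rw [← List.sum_toFinset _ hKnodup]
    have hsame : K.toFinset = (subL.filter (fun c => !pvPunctsL.contains c)).toFinset := by
      ext k
      simp only [List.mem_toFinset, hK, List.mem_filter, PySem.Set.mem_ofList]
    rw [hsame]
    apply Finset.sum_congr rfl
    intro k hk
    have hknp : (!pvPunctsL.contains k) = true := by
      rcases List.mem_filter.mp (List.mem_toFinset.mp hk) with ⟨_, h⟩
      exact h
    have hcf : (subL.filter (fun c => !pvPunctsL.contains c)).count k = subL.count k := by
      rw [List.count_filter]
      simpa using hknp
    rw [hcf]
  rw [hsum]
  split_ifs with h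
  · exact (decide_eq_true h).symm
  · exact (decide_eq_false h).symm

-- ===== VERDICT (by name: the statement is the Claim_ definition above) =====
theorem CheckInvariantDict_spec : Claim_equal_CheckInvariantDict := by
  intro a b c _
  exact CheckInvariantDict_eq_alt a b c
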